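-- pv_equiv track=rewrite | github.com/ijunseo/Atcoder | 251112 AHC 056/solution.py | argmin_C_plus_Q
-- ===== SOURCE A (Python) =====
-- def argmin_C_plus_Q(E:int) -> int:
--     """
--     E = X+1 (이벤트 수). C in [1..E]에서 C + ceil(E/C) 최소인 C를 반환.
--     """
--     bestC, bestCost = 1, 10**18
--     for C in range(1, E+1):
--         Q = (E + C - 1)//C
--         cost = C + Q
--         if cost < bestCost:
--             bestCost = cost
--             bestC = C
--     return bestC
-- ===== SOURCE B (Python) =====
-- def argmin_C_plus_Q(E: int) -> int:
--     """
--     Same result as the linear scan, but only candidates C with (C-1)^2 <= E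
--     need to be examined: for C >= isqrt(E)+1 the cost C + ceil(E/C) is
--     nondecreasing, so the first minimizer lies in [1, isqrt(E)+1].
--     """
--     bestC = 1
--     bestCost = None
--     C = 1
--     while C <= E and (C - 1) * (C - 1) <= E:
--         cost = C + (E + C - 1) // C
--         if bestCost is None or cost < bestCost:
--             bestC, bestCost = C, cost
--         C += 1
--     return bestC
-- ===== Notes on version B (the rewrite author's own statement) =====
-- stated objective: faster
-- what changed: Instead of scanning all C in [1..E], B scans only C with (C-1)^2 <= E (i.e. C <= isqrt(E)+1), which provably contains the first minimizer because C + ceil(E/C) is nondecreasing beyond isqrt(E)+1.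
import Mathlib
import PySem

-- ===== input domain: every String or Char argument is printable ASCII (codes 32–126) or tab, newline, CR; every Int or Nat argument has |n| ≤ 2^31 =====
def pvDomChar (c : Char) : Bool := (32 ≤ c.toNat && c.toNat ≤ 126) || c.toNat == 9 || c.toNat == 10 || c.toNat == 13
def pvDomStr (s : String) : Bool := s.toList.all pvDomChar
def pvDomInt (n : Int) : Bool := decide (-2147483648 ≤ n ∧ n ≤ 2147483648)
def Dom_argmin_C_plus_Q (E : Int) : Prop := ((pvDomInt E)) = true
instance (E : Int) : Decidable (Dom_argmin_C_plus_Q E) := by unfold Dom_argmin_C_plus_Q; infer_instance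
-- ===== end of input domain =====

-- B scans only candidates C with (C-1)^2 ≤ E (so O(√E) instead of A's O(E) scan);
-- the cost C + ceil(E/C) is nondecreasing beyond that bound, so the first minimizer is kept.

-- ===== PORT A =====
def argmin_C_plus_Q (E : Int) : Int :=
  ((PySem.List.pyRange 1 (E + 1) 1).foldl
      (fun (st : Int × Int) C =>
        let Q := PySem.Int.floordiv (E + C - 1) C
        let cost := C + Q
        if cost < st.2 then (C, cost) else st)
      (1, 10 ^ 18)).1

-- ===== PORT B =====
-- the while loop of Source B: state (C, bestC, bestCost); bestCost = None ↦ none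
def pvBLoop (E C bestC : Int) (bestCost : Option Int) : Int × Option Int :=
  if h : C ≤ E ∧ (C - 1) * (C - 1) ≤ E then
    let cost := C + PySem.Int.floordiv (E + C - 1) C
    let upd : Int × Int :=
      match bestCost with
      | none => (C, cost)
      | some b => if cost < b then (C, cost) else (bestC, b)
    pvBLoop E (C + 1) upd.1 (some upd.2)
  else (bestC, bestCost)
termination_by (E + 1 - C).toNat
decreasing_by omega

def argmin_C_plus_Q_alt (E : Int) : Int := (pvBLoop E 1 1 none).1

-- ===== PRECONDITION & SPEC =====
def Spec_argmin_C_plus_Q (E : Int) (out : Int) : Prop := out = argmin_C_plus_Q_alt E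
instance (E : Int) (out : Int) : Decidable (Spec_argmin_C_plus_Q E out) := by unfold Spec_argmin_C_plus_Q; infer_instance

-- ===== CLAIM (what is proved, stated in full; the proofs are below) =====
def Claim_equal_argmin_C_plus_Q : Prop := ∀ (E : Int), Dom_argmin_C_plus_Q E → Spec_argmin_C_plus_Q E (argmin_C_plus_Q E)

-- ===== LEMMAS AND PROOFS =====

-- the cost function C + ceil(E/C) and A's loop body
def pvF (E C : Int) : Int := C + PySem.Int.floordiv (E + C - 1) C

def pvStep (E : Int) (st : Int × Int) (C : Int) : Int × Int :=
  if pvF E C < st.2 then (C, pvF E C) else st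

-- the last candidate B examines: min(E, isqrt(E)+1)
def pvM (E : Int) : Int := min E ((Nat.sqrt E.toNat : Int) + 1)

lemma pvA_eq_foldl (E : Int) :
    argmin_C_plus_Q E = ((PySem.List.pyRange 1 (E + 1) 1).foldl (pvStep E) (1, 10 ^ 18)).1 := rfl

-- ceil bracket: E ≤ q*C ≤ E + C - 1 for q = (E+C-1)//C, C > 0
lemma pvCeil_bracket (E C : Int) (hC : 0 < C) :
    E ≤ PySem.Int.floordiv (E + C - 1) C * C ∧
    PySem.Int.floordiv (E + C - 1) C * C ≤ E + C - 1 := by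
  have h := (PySem.Int.floordiv_eq_iff_of_pos (a := E + C - 1) (b := C)
      (q := PySem.Int.floordiv (E + C - 1) C) hC).mp rfl
  have hexp : (PySem.Int.floordiv (E + C - 1) C + 1) * C
      = PySem.Int.floordiv (E + C - 1) C * C + C := by ring
  constructor
  · have := h.2; rw [hexp] at this; linarith
  · exact h.1

lemma pvFd_one (E : Int) : PySem.Int.floordiv E 1 = E := by
  rw [(PySem.Int.floordiv_eq_iff_of_pos (a := E) (b := 1) (q := E) (by omega))]
  omega

-- monotonicity of the cost beyond the square root: E ≤ C*(C+1) → pvF E C ≤ pvF E (C+1)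
lemma pvF_mono (E C : Int) (_hE : 1 ≤ E) (hC : 1 ≤ C) (h : E ≤ C * (C + 1)) :
    pvF E C ≤ pvF E (C + 1) := by
  have hq := pvCeil_bracket E C (by omega)
  have hq' := pvCeil_bracket E (C + 1) (by omega)
  set q := PySem.Int.floordiv (E + C - 1) C with hqdef
  set q' := PySem.Int.floordiv (E + (C + 1) - 1) (C + 1) with hq'def
  -- q' ≤ C since q'*(C+1) ≤ E + C ≤ C*(C+1) + C < (C+1)*(C+1)
  have hq'le : q' ≤ C := by nlinarith [hq'.2, hq'.1]
  -- q ≤ q' + 1 since (q'+1)*C ≥ E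
  have : q ≤ q' + 1 := by nlinarith [hq.1, hq.2, hq'.1, hq'.2]
  simp only [pvF, ← hqdef, ← hq'def]
  omega

-- chain: pvF is nondecreasing from s+1 on, where E < (s+1)^2
lemma pvF_chain (E s : Int) (hE : 1 ≤ E) (hs0 : 0 ≤ s) (hs : E < (s + 1) * (s + 1)) :
    ∀ n : Nat, pvF E (s + 1) ≤ pvF E (s + 1 + n) := by
  intro n
  induction n with
  | zero => simp
  | succ k ih =>
    have hstep : pvF E (s + 1 + k) ≤ pvF E (s + 1 + k + 1) := by
      apply pvF_mono E _ hE (by omega)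
      nlinarith [(Nat.cast_nonneg k : (0:Int) ≤ (k:Int))]
    have : (s + 1 + (k + 1 : Nat)) = (s + 1 + k + 1) := by push_cast; ring
    rw [this]
    exact le_trans ih hstep

lemma pvF_ge (E s C : Int) (hE : 1 ≤ E) (hs0 : 0 ≤ s) (hs : E < (s + 1) * (s + 1))
    (hC : s + 1 ≤ C) : pvF E (s + 1) ≤ pvF E C := by
  have h1 : C = s + 1 + ((C - (s + 1)).toNat : Int) := by omega
  rw [h1]
  exact pvF_chain E s hE hs0 hs _

-- the final best cost never increases along the fold
lemma pvFoldl_snd_le (E : Int) : ∀ (l : List Int) (st : Int × Int),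
    (l.foldl (pvStep E) st).2 ≤ st.2 := by
  intro l
  induction l with
  | nil => intro st; simp
  | cons a t ih =>
    intro st
    simp only [List.foldl_cons]
    refine le_trans (ih _) ?_
    unfold pvStep
    split
    · simp only []; omega
    · omega

-- the final best cost is ≤ the cost of any examined candidate
lemma pvFoldl_le_mem (E : Int) : ∀ (l : List Int) (st : Int × Int) (C : Int),
    C ∈ l → (l.foldl (pvStep E) st).2 ≤ pvF E C := by
  intro l
  induction l with
  | nil => intro st C h; simp at h
  | cons a t ih =>
    intro st C h
    simp only [List.foldl_cons]
    rcases List.mem_cons.mp h with rfl | hmem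
    · refine le_trans (pvFoldl_snd_le E t _) ?_
      unfold pvStep; split <;> omega
    · exact ih _ C hmem

-- folding A's step over candidates whose cost is not below the current best is a no-op
lemma pvFoldl_noop (E : Int) : ∀ (n : Nat) (a b : Int) (st : Int × Int),
    (b - a).toNat = n → (∀ C, a ≤ C → C < b → st.2 ≤ pvF E C) →
    (PySem.List.pyRange a b 1).foldl (pvStep E) st = st := by
  intro n
  induction n with
  | zero =>
    intro a b st hn _
    rw [PySem.List.pyRange_one_eq_nil (by omega)]
    rfl
  | succ k ih =>
    intro a b st hn hge
    rw [PySem.List.pyRange_one_cons (by omega)]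
    simp only [List.foldl_cons]
    have hstep : pvStep E st a = st := by
      unfold pvStep
      have := hge a (by omega) (by omega)
      split <;> [omega; rfl]
    rw [hstep]
    exact ih (a + 1) b st (by omega) (fun C h1 h2 => hge C (by omega) h2)

-- B's loop condition is exactly C ≤ pvM E (for 1 ≤ C, 1 ≤ E)
lemma pvCond_iff (E C : Int) (hC : 1 ≤ C) (hE : 1 ≤ E) :
    (C ≤ E ∧ (C - 1) * (C - 1) ≤ E) ↔ C ≤ pvM E := by
  have hsq : ((C - 1) * (C - 1) ≤ E) ↔ (C - 1 ≤ (Nat.sqrt E.toNat : Int)) := by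
    have ha : ((C - 1).toNat : Int) = C - 1 := Int.toNat_of_nonneg (by omega)
    constructor
    · intro h
      have h1 : (C - 1).toNat * (C - 1).toNat ≤ E.toNat := by
        have : ((C-1).toNat * (C-1).toNat : Int) ≤ (E.toNat : Int) := by
          push_cast [ha]; omega
        exact_mod_cast this
      have := Nat.le_sqrt.mpr h1
      omega
    · intro h
      have h1 : (C - 1).toNat ≤ Nat.sqrt E.toNat := by omega
      have h2 := Nat.le_sqrt.mp h1
      have h3 : ((C-1).toNat * (C-1).toNat : Int) ≤ (E.toNat : Int) := by exact_mod_cast h2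
      push_cast [ha] at h3
      omega
  unfold pvM
  constructor
  · rintro ⟨h1, h2⟩
    exact le_min h1 (by have := hsq.mp h2; omega)
  · intro h
    refine ⟨le_trans h (min_le_left _ _), hsq.mpr ?_⟩
    have := le_trans h (min_le_right _ _)
    omega

-- B's loop (with a some-state) computes A's fold over the candidate range [C, pvM E]
lemma pvBLoop_eq_foldl (E : Int) (hE : 1 ≤ E) : ∀ (n : Nat) (C bc b : Int),
    (E + 1 - C).toNat = n → 1 ≤ C →
    pvBLoop E C bc (some b) =
      (((PySem.List.pyRange C (pvM E + 1) 1).foldl (pvStep E) (bc, b)).1,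
       some ((PySem.List.pyRange C (pvM E + 1) 1).foldl (pvStep E) (bc, b)).2) := by
  intro n
  induction n with
  | zero =>
    intro C bc b hn hC
    have hcond : ¬ (C ≤ E ∧ (C - 1) * (C - 1) ≤ E) := by
      intro h; omega
    rw [pvBLoop, dif_neg hcond, PySem.List.pyRange_one_eq_nil (by unfold pvM; omega)]
    simp
  | succ k ih =>
    intro C bc b hn hC
    by_cases hcond : C ≤ E ∧ (C - 1) * (C - 1) ≤ E
    · have hM : C ≤ pvM E := (pvCond_iff E C hC hE).mp hcond
      rw [pvBLoop, dif_pos hcond,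
        PySem.List.pyRange_one_cons (show C < pvM E + 1 by omega)]
      simp only [List.foldl_cons]
      have hupd : pvStep E (bc, b) C =
          (if C + PySem.Int.floordiv (E + C - 1) C < b
           then (C, C + PySem.Int.floordiv (E + C - 1) C) else (bc, b)) := by
        unfold pvStep pvF; split <;> simp_all
      rw [← hupd] at *
      have := ih (C + 1) (pvStep E (bc, b) C).1 (pvStep E (bc, b) C).2
        (by omega) (by omega)
      simpa using this
    · have hM : ¬ C ≤ pvM E := fun h => hcond ((pvCond_iff E C hC hE).mpr h)
      rw [pvBLoop, dif_neg hcond, PySem.List.pyRange_one_eq_nil (by omega)]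
      simp

-- ===== VERDICT (by name: the statement is the Claim_ definition above) =====
theorem argmin_C_plus_Q_spec : Claim_equal_argmin_C_plus_Q := by
  intro E hD
  unfold Spec_argmin_C_plus_Q
  have hDom : E ≤ 2147483648 := by
    unfold Dom_argmin_C_plus_Q pvDomInt at hD
    simp at hD; omega
  by_cases hE : E ≤ 0
  · -- both loops are empty
    rw [pvA_eq_foldl, PySem.List.pyRange_one_eq_nil (by omega)]
    unfold argmin_C_plus_Q_alt
    rw [pvBLoop, dif_neg (by omega)]
    simp
  · have hE1 : 1 ≤ E := by omega
    have hM1 : 1 ≤ pvM E := by unfold pvM; omega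
    have hME : pvM E ≤ E := min_le_left _ _
    -- first iteration: C = 1, cost = 1 + E
    have hcost1 : pvF E 1 = 1 + E := by unfold pvF; rw [show E + 1 - 1 = E by ring, pvFd_one]
    have hstep1 : pvStep E (1, 10 ^ 18) 1 = (1, 1 + E) := by
      unfold pvStep; rw [hcost1, if_pos (by norm_num; omega)]
    -- A's fold, split at pvM E + 1 and peel the first element
    rw [pvA_eq_foldl,
      PySem.List.pyRange_one_append 1 (pvM E + 1) (E + 1) (by omega) (by omega),
      List.foldl_append]
    -- the tail is a no-op
    have hpre : (PySem.List.pyRange 1 (pvM E + 1) 1).foldl (pvStep E) (1, 10 ^ 18)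
        = (PySem.List.pyRange (1 + 1) (pvM E + 1) 1).foldl (pvStep E) (1, 1 + E) := by
      rw [PySem.List.pyRange_one_cons (by omega)]
      simp only [List.foldl_cons, hstep1]
    have htail : ((PySem.List.pyRange (pvM E + 1) (E + 1) 1).foldl (pvStep E)
        ((PySem.List.pyRange 1 (pvM E + 1) 1).foldl (pvStep E) (1, 10 ^ 18)))
        = (PySem.List.pyRange 1 (pvM E + 1) 1).foldl (pvStep E) (1, 10 ^ 18) := by
      apply pvFoldl_noop E (E + 1 - (pvM E + 1)).toNat _ _ _ rfl
      intro C hC1 hC2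
      -- here pvM E < E, hence pvM E = isqrt E + 1
      have hMlt : pvM E < E := by omega
      have hMs : pvM E = (Nat.sqrt E.toNat : Int) + 1 := by unfold pvM at *; omega
      have hbest : ((PySem.List.pyRange 1 (pvM E + 1) 1).foldl (pvStep E) (1, 10 ^ 18)).2
          ≤ pvF E (pvM E) :=
        pvFoldl_le_mem E _ _ _ (PySem.List.mem_pyRange_one.mpr ⟨by omega, by omega⟩)
      refine le_trans hbest ?_
      rw [hMs]
      apply pvF_ge E (Nat.sqrt E.toNat : Int) C hE1 (by positivity) _ (by omega)
      have h0 : E.toNat < (Nat.sqrt E.toNat + 1) * (Nat.sqrt E.toNat + 1) := by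
        simpa [Nat.succ_eq_add_one] using Nat.lt_succ_sqrt E.toNat
      have h2 : (E.toNat : Int) = E := Int.toNat_of_nonneg (by omega)
      have h5 : ((E.toNat : Int)) < ((Nat.sqrt E.toNat : Int) + 1) * ((Nat.sqrt E.toNat : Int) + 1) := by
        exact_mod_cast h0
      omega
    rw [htail, hpre]
    -- B's side: unfold the first iteration, then apply the loop/fold correspondence
    unfold argmin_C_plus_Q_alt
    rw [pvBLoop, dif_pos (show (1 : Int) ≤ E ∧ (1 - 1) * (1 - 1) ≤ E by constructor <;> omega)]
    have hfd : (1 : Int) + PySem.Int.floordiv (E + 1 - 1) 1 = 1 + E := by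
      rw [show E + 1 - 1 = E by ring, pvFd_one]
    rw [pvBLoop_eq_foldl E hE1 (E + 1 - (1 + 1)).toNat (1 + 1) 1
      (1 + PySem.Int.floordiv (E + 1 - 1) 1) rfl (by omega), hfd]
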